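-- pv_equiv track=rewrite | github.com/kiannabolante/Big-Little-Matching | Big_Little_Matching.py | matching_list
-- ===== SOURCE A (Python) =====
-- def matching_list(littles, bigs, point):
--     points = 0
--     for little in littles:
--         if little != "No Preference":
--             for big in bigs:
--                 if little == big:
--                     points += point
--     return points
-- ===== SOURCE B (Python) =====
-- def matching_list(littles, bigs, point):
--     little_count = {}
--     for l in littles:
--         if l != "No Preference":
--             little_count[l] = little_count.get(l, 0) + 1
--     big_count = {}
--     for b in bigs:
--         big_count[b] = big_count.get(b, 0) + 1
--     total = 0
--     for name, lc in little_count.items():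
--         total += lc * big_count.get(name, 0)
--     return total * point
-- ===== Notes on version B (the rewrite author's own statement) =====
-- stated objective: faster
-- what changed: Replaces A's nested per-pair scan with two frequency tables built once (eligible littles and bigs), then a single loop over the distinct little names summing the product of the two counts, multiplied by point at the end.
import Mathlib
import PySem

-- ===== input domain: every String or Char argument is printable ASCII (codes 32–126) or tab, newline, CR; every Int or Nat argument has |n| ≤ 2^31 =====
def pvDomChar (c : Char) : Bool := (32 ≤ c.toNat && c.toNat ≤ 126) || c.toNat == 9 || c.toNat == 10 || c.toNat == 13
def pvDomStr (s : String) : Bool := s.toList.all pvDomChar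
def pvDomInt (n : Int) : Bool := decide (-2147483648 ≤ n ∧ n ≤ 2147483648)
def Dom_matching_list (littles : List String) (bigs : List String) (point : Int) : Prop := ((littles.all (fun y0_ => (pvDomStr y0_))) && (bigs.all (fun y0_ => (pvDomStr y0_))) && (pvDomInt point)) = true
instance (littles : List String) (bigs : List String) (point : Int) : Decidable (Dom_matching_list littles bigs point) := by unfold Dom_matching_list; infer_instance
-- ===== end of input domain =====

-- B replaces A's nested per-pair scan with two frequency tables and one loop over the
-- distinct eligible little names, summing products of counts (asymptotically faster).

-- ===== PORT A =====
def matching_list (littles : List String) (bigs : List String) (point : Int) : Int :=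
  littles.foldl (fun points little =>
    if little ≠ "No Preference" then
      bigs.foldl (fun pts big => if little = big then pts + point else pts) points
    else points) 0

-- ===== PORT B =====
def matching_list_alt (littles : List String) (bigs : List String) (point : Int) : Int :=
  let little_count : PySem.Dict String Int :=
    littles.foldl (fun d l =>
      if l ≠ "No Preference" then d.insert l (d.getD l 0 + 1) else d) PySem.Dict.empty
  let big_count : PySem.Dict String Int :=
    bigs.foldl (fun d b => d.insert b (d.getD b 0 + 1)) PySem.Dict.empty
  let total : Int :=
    little_count.items.foldl (fun t p => t + p.2 * big_count.getD p.1 0) 0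
  total * point

-- ===== PRECONDITION & SPEC =====
def Spec_matching_list (littles : List String) (bigs : List String) (point : Int) (out : Int) : Prop := out = matching_list_alt littles bigs point
instance (littles : List String) (bigs : List String) (point : Int) (out : Int) : Decidable (Spec_matching_list littles bigs point out) := by unfold Spec_matching_list; infer_instance

-- ===== CLAIM (what is proved, stated in full; the proofs are below) =====
def Claim_equal_matching_list : Prop := ∀ (littles : List String) (bigs : List String) (point : Int), Dom_matching_list littles bigs point → Spec_matching_list littles bigs point (matching_list littles bigs point)

-- ===== LEMMAS AND PROOFS =====

-- A's inner loop over bigs adds point once per occurrence of `little`.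
theorem pv_inner_eq_count (bigs : List String) (little : String) (point acc : Int) :
    bigs.foldl (fun pts big => if little = big then pts + point else pts) acc
      = acc + (bigs.count little : Int) * point := by
  induction bigs generalizing acc with
  | nil => simp
  | cons b bs ih =>
    by_cases h : little = b
    · subst h
      simp [List.foldl, ih]
      ring
    · simp [List.foldl, ih, h, Ne.symm h]

-- Over a Nodup list, summing an indicator at a ∈ S picks out f a.
theorem pv_sum_ite_zero (S : List String) (f : String → Int) (a : String) (h : a ∉ S) :
    (S.map (fun k => if k = a then f k else 0)).sum = 0 := by
  induction S with
  | nil => simp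
  | cons s ss ih =>
    simp only [List.mem_cons, not_or] at h
    have hsa : s ≠ a := fun hc => h.1 hc.symm
    simp [hsa, ih h.2]

theorem pv_sum_ite (S : List String) (f : String → Int) (a : String)
    (hnd : S.Nodup) (ha : a ∈ S) :
    (S.map (fun k => if k = a then f k else 0)).sum = f a := by
  induction S with
  | nil => simp at ha
  | cons s ss ih =>
    rcases List.nodup_cons.mp hnd with ⟨hs, hnd'⟩
    rcases List.mem_cons.mp ha with rfl | h
    · simp [pv_sum_ite_zero ss f a hs]
    · have hsa : s ≠ a := fun hc => hs (hc ▸ h)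
      have h0 : (if s = a then f s else 0) = 0 := if_neg hsa
      simp [h0, ih hnd' h]

-- Summing count(L,k)·f k over any Nodup superset S of L's elements counts each l ∈ L once.
theorem pv_sum_count_mul (L S : List String) (f : String → Int)
    (hnd : S.Nodup) (hsub : ∀ k ∈ L, k ∈ S) :
    (S.map (fun k => (L.count k : Int) * f k)).sum = (L.map f).sum := by
  induction L with
  | nil => simp
  | cons a tl ih =>
    have hstep : ∀ k : String,
        ((List.count k (a :: tl) : Int)) * f k
          = (tl.count k : Int) * f k + (if k = a then f k else 0) := by
      intro k
      by_cases h : k = a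
      · subst h; simp [List.count_cons_self]; ring
      · have h' : ¬ a = k := fun hc => h hc.symm
        simp [h, h']
    calc (S.map (fun k => ((a :: tl).count k : Int) * f k)).sum
        = (S.map (fun k => (tl.count k : Int) * f k
            + (if k = a then f k else 0))).sum := by
          congr 1; exact List.map_congr_left (fun k _ => hstep k)
      _ = (S.map (fun k => (tl.count k : Int) * f k)).sum
            + (S.map (fun k => if k = a then f k else 0)).sum := by
          rw [← List.sum_map_add]
      _ = (tl.map f).sum + f a := by
          rw [ih (fun k hk => hsub k (List.mem_cons_of_mem a hk)),
              pv_sum_ite S f a hnd (hsub a (List.mem_cons_self))]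
      _ = ((a :: tl).map f).sum := by simp [List.map_cons]; ring

-- ===== VERDICT (by name: the statement is the Claim_ definition above) =====
theorem matching_list_spec : Claim_equal_matching_list := by
  intro littles bigs point _
  unfold Spec_matching_list matching_list matching_list_alt
  -- B's two counting loops are counters (of the eligible littles, and of the bigs).
  rw [PySem.List.foldl_ite_eq_foldl_filter (p := fun l => l ≠ "No Preference")
        (f := fun d l => PySem.Dict.insert d l (PySem.Dict.getD d l 0 + 1)),
      PySem.Dict.foldl_insert_getD_add_one_eq_counter,
      PySem.Dict.foldl_insert_getD_add_one_eq_counter]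
  -- A's loop: rewrite the inner fold to a count, filter out "No Preference", sum.
  have hA : littles.foldl (fun points little =>
      if little ≠ "No Preference" then
        bigs.foldl (fun pts big => if little = big then pts + point else pts) points
      else points) 0
      = ((littles.filter fun x => decide (x ≠ "No Preference")).map
          (fun l => (bigs.count l : Int) * point)).sum := by
    have hc := PySem.List.foldl_congr_mem (l := littles) (init := (0 : Int))
      (f := fun points little =>
        if little ≠ "No Preference" then
          bigs.foldl (fun pts big => if little = big then pts + point else pts) points
        else points)
      (g := fun points little =>
        if little ≠ "No Preference" then points + (bigs.count little : Int) * point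
        else points)
      (fun acc x _ => by
        by_cases h : x ≠ "No Preference" <;> simp [h, pv_inner_eq_count])
    rw [hc,
        PySem.List.foldl_ite_eq_foldl_filter (p := fun l => l ≠ "No Preference")
          (f := fun points little => points + (bigs.count little : Int) * point),
        PySem.List.foldl_add (g := fun l => (bigs.count l : Int) * point)]
    simp
  rw [hA]
  -- zeta-reduce B's `let`s (definitional) to expose the summation loop.
  show ((littles.filter fun x => decide (x ≠ "No Preference")).map
          (fun l => (bigs.count l : Int) * point)).sum
      = (List.foldl (fun t p => t + p.2 * (PySem.Dict.counter bigs).getD p.1 0) 0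
          (PySem.Dict.counter (littles.filter fun x => decide (x ≠ "No Preference"))).items)
        * point
  -- B's summation loop over the items of the little counter.
  rw [PySem.List.foldl_add (g := fun p : String × Int =>
        p.2 * (PySem.Dict.counter bigs).getD p.1 0),
      PySem.Dict.items_counter]
  simp only [List.map_map, zero_add]
  have hmap : ((PySem.Set.ofList (littles.filter fun x => decide (x ≠ "No Preference"))).map
      ((fun p : String × Int => p.2 * (PySem.Dict.counter bigs).getD p.1 0) ∘
        fun k => (k, ((littles.filter fun x => decide (x ≠ "No Preference")).count k : Int)))).sum
      = ((PySem.Set.ofList (littles.filter fun x => decide (x ≠ "No Preference"))).map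
          (fun k => ((littles.filter fun x => decide (x ≠ "No Preference")).count k : Int)
            * (bigs.count k : Int))).sum := by
    congr 1
    exact List.map_congr_left (fun k _ => by
      simp [Function.comp, PySem.Dict.getD_counter])
  rw [hmap, pv_sum_count_mul (littles.filter fun x => decide (x ≠ "No Preference"))
        (PySem.Set.ofList (littles.filter fun x => decide (x ≠ "No Preference")))
        (fun k => (bigs.count k : Int))
        (PySem.Set.nodup_ofList _) (fun k hk => (PySem.Set.mem_ofList _ k).mpr hk)]
  rw [← List.sum_map_mul_right]
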